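-- pv_equiv track=rewrite | github.com/antonioferris/wordle_solver | main.py | get_buckets
-- ===== SOURCE A (Python) =====
-- from collections import defaultdict
--
-- def get_results(guess, word):
--     res = []
--     #
--     for i in range(len(guess)):
--         if guess[i] == word[i]:
--             res.append("G")
--         elif guess[i] in word:
--             # only write "Y" if the actual placement of this letter isn't green.
--             y = False
--             for j in range(len(guess)):
--                 if i == j:
--                     continue
--                 if word[j] == guess[i] and guess[j] != word[j]: # a column where there is this letter not green
--                     y = True
--                     break
--             if y:
--                 res.append("Y")
--             else:
--                 res.append("_")
--         else:
--             res.append("_")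
--     return tuple(res)
--
-- def get_buckets(guess, poss_words):
--     """
--         given a guess, return a dictionary
--     """
--     buckets = defaultdict(list)
--     for word in poss_words:
--         if guess == word:
--             continue
--         res = get_results(guess, word)
--         buckets[res].append(word)
--
--     return buckets
-- ===== SOURCE B (Python) =====
-- from collections import defaultdict
--
-- def get_results(guess, word):
--     n = len(guess)
--     # stage 1: greens only
--     res = ["G" if guess[i] == word[i] else "_" for i in range(n)]
--     # inverted index: each guess letter -> its non-green positions
--     where = {}
--     for i in range(n):
--         if res[i] == "_":
--             where.setdefault(guess[i], []).append(i)
--     # stage 2: every non-green column of word scatters "Y" onto matching guess positions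
--     for j in range(n):
--         if res[j] != "G":
--             for i in where.get(word[j], ()):
--                 res[i] = "Y"
--     return tuple(res)
--
-- def get_buckets(guess, poss_words):
--     buckets = defaultdict(list)
--     for word in poss_words:
--         if word != guess:
--             buckets[get_results(guess, word)].append(word)
--     return buckets
-- ===== Notes on version B (the rewrite author's own statement) =====
-- stated objective: alternative
-- what changed: get_results is inverted from gather to scatter: B first marks greens, builds an inverted index from each guess letter to its non-green positions, then walks the word's non-green columns and scatters 'Y' onto the indexed positions, where A decides each position by an inner existence scan over all columns.
import Mathlib
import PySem

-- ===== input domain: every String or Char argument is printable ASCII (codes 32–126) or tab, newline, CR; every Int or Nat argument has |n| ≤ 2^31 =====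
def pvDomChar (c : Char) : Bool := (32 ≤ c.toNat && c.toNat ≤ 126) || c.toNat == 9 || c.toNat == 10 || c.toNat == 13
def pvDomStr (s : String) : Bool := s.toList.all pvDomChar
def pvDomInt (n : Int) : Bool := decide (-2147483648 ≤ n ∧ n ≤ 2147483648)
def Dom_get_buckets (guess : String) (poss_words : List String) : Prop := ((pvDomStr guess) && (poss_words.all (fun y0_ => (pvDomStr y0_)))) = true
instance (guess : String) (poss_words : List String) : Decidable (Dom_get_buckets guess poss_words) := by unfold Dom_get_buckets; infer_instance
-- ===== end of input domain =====

-- B inverts get_results from gather to scatter: greens first, then an inverted index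
-- (guess letter -> its non-green positions) over which the word's non-green columns
-- scatter "Y"; A instead decides each position by an inner existence scan (objective: alternative).

-- ===== PORT A =====
-- get_results of A: indices are in range under Pre_ (guess no longer than word), so xs.getD is exact there.
def get_results_A (guess word : String) : List String :=
  let g := guess.toList
  let w := word.toList
  (List.range g.length).foldl (fun res i =>
    if g.getD i ' ' = w.getD i ' ' then res ++ ["G"]
    else if g.getD i ' ' ∈ w then
      -- inner loop: y = any j ≠ i with word[j] == guess[i] and guess[j] != word[j]
      if (List.range g.length).any (fun j =>
            !(j == i) && (w.getD j ' ' == g.getD i ' ') && !(g.getD j ' ' == w.getD j ' '))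
      then res ++ ["Y"] else res ++ ["_"]
    else res ++ ["_"]) []

def get_buckets (guess : String) (poss_words : List String) : List (List String × List String) :=
  (poss_words.foldl (fun buckets word =>
    if guess = word then buckets
    else buckets.modify (get_results_A guess word) [] (· ++ [word])) PySem.Dict.empty).items

-- ===== PORT B =====
def get_results_B (guess word : String) : List String :=
  let g := guess.toList
  let w := word.toList
  let n := g.length
  -- stage 1: greens only
  let res0 := (List.range n).map (fun i => if g.getD i ' ' = w.getD i ' ' then "G" else "_")
  -- inverted index: guess letter -> its non-green positions
  let whereIdx := (List.range n).foldl (fun d i =>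
      if res0.getD i "" = "_" then d.modify (g.getD i ' ') [] (· ++ [i]) else d)
    (PySem.Dict.empty : PySem.Dict Char (List Nat))
  -- stage 2: each non-green column of word scatters "Y" onto the indexed positions
  (List.range n).foldl (fun res j =>
    if res.getD j "" ≠ "G" then
      (whereIdx.getD (w.getD j ' ') []).foldl (fun r i => r.set i "Y") res
    else res) res0

def get_buckets_alt (guess : String) (poss_words : List String) : List (List String × List String) :=
  (poss_words.foldl (fun buckets word =>
    if word ≠ guess then buckets.modify (get_results_B guess word) [] (· ++ [word])
    else buckets) PySem.Dict.empty).items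

-- ===== PRECONDITION & SPEC =====
-- Pre_ excludes inputs on which A raises IndexError: a word (other than guess) shorter than guess.
def Pre_get_buckets (guess : String) (poss_words : List String) : Prop :=
  ∀ w ∈ poss_words, guess ≠ w → guess.toList.length ≤ w.toList.length
instance (guess : String) (poss_words : List String) : Decidable (Pre_get_buckets guess poss_words) := by unfold Pre_get_buckets; infer_instance
def pvWitness_get_buckets : String × List String := ("crane", ["crane", "cranes", "brand", "nacre"])

def Spec_get_buckets (guess : String) (poss_words : List String) (out : List (List String × List String)) : Prop := out = get_buckets_alt guess poss_words
instance (guess : String) (poss_words : List String) (out : List (List String × List String)) : Decidable (Spec_get_buckets guess poss_words out) := by unfold Spec_get_buckets; infer_instance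

-- ===== CLAIM (what is proved, stated in full; the proofs are below) =====
def Claim_equal_get_buckets : Prop := ∀ (guess : String) (poss_words : List String), Dom_get_buckets guess poss_words → Pre_get_buckets guess poss_words → Spec_get_buckets guess poss_words (get_buckets guess poss_words)

-- ===== LEMMAS AND PROOFS =====

-- common pointwise description of the per-word pattern
def patF (g w : List Char) (yp : Nat → Bool) (i : Nat) : String :=
  if g.getD i ' ' = w.getD i ' ' then "G" else if yp i then "Y" else "_"

def ypFull (g w : List Char) (i : Nat) : Bool :=
  (List.range g.length).any (fun j =>
    !(g.getD j ' ' == w.getD j ' ') && (w.getD j ' ' == g.getD i ' '))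

lemma A_eq_pattern (g w : List Char) (hlen : g.length ≤ w.length) :
    (List.range g.length).foldl (fun res i =>
      if g.getD i ' ' = w.getD i ' ' then res ++ ["G"]
      else if g.getD i ' ' ∈ w then
        if (List.range g.length).any (fun j =>
              !(j == i) && (w.getD j ' ' == g.getD i ' ') && !(g.getD j ' ' == w.getD j ' '))
        then res ++ ["Y"] else res ++ ["_"]
      else res ++ ["_"]) [] =
    (List.range g.length).map (patF g w (ypFull g w)) := by
  rw [show (fun (res : List String) (i : Nat) =>
        if g.getD i ' ' = w.getD i ' ' then res ++ ["G"]
        else if g.getD i ' ' ∈ w then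
          if (List.range g.length).any (fun j =>
                !(j == i) && (w.getD j ' ' == g.getD i ' ') && !(g.getD j ' ' == w.getD j ' '))
          then res ++ ["Y"] else res ++ ["_"]
        else res ++ ["_"]) =
      (fun res i => res ++ [if g.getD i ' ' = w.getD i ' ' then "G"
        else if g.getD i ' ' ∈ w then
          if (List.range g.length).any (fun j =>
                !(j == i) && (w.getD j ' ' == g.getD i ' ') && !(g.getD j ' ' == w.getD j ' '))
          then "Y" else "_"
        else "_"]) from by funext res i; split_ifs <;> rfl]
  rw [PySem.List.foldl_append_singleton_eq_map]
  simp only [List.nil_append]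
  apply List.map_congr_left
  intro i hi
  rw [List.mem_range] at hi
  unfold patF
  by_cases hgr : g.getD i ' ' = w.getD i ' '
  · simp only [if_pos hgr]
  · simp only [if_neg hgr]
    have hyp : ypFull g w i = true ↔
        ∃ j < g.length, g.getD j ' ' ≠ w.getD j ' ' ∧ w.getD j ' ' = g.getD i ' ' := by
      simp [ypFull, List.any_eq_true, List.mem_range]
    by_cases hY : ∃ j < g.length, g.getD j ' ' ≠ w.getD j ' ' ∧ w.getD j ' ' = g.getD i ' '
    · obtain ⟨j, hj, hne, heq⟩ := hY
      have hji : j ≠ i := by intro h; subst h; exact hgr heq.symm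
      have hin : g.getD i ' ' ∈ w := by
        rw [← heq]
        have hjw : j < w.length := lt_of_lt_of_le hj hlen
        rw [List.getD_eq_getElem w ' ' hjw]
        exact List.getElem_mem _
      have hany : (List.range g.length).any (fun j =>
          !(j == i) && (w.getD j ' ' == g.getD i ' ') && !(g.getD j ' ' == w.getD j ' ')) = true := by
        rw [List.any_eq_true]
        refine ⟨j, List.mem_range.mpr hj, ?_⟩
        simp only [Bool.and_eq_true, Bool.not_eq_true', beq_eq_false_iff_ne, beq_iff_eq]
        exact ⟨⟨hji, heq⟩, hne⟩
      rw [if_pos hin, if_pos hany, if_pos (hyp.mpr ⟨j, hj, hne, heq⟩)]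
    · have hBn : ¬ (ypFull g w i = true) := by rw [hyp]; exact hY
      have hAny : ¬ ((List.range g.length).any (fun j =>
          !(j == i) && (w.getD j ' ' == g.getD i ' ') && !(g.getD j ' ' == w.getD j ' '))) = true := by
        rw [List.any_eq_true]
        rintro ⟨j, hjm, hb⟩
        rw [List.mem_range] at hjm
        simp only [Bool.and_eq_true, Bool.not_eq_true', beq_eq_false_iff_ne, beq_iff_eq] at hb
        exact hY ⟨j, hjm, hb.2, hb.1.2⟩
      by_cases hin : g.getD i ' ' ∈ w
      · rw [if_pos hin, if_neg hAny, if_neg hBn]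
      · rw [if_neg hin, if_neg hBn]

-- setting one in-range cell of a map-over-range list
lemma set_map_range (n a : Nat) (_ha : a < n) (f : Nat → String) (v : String) :
    ((List.range n).map f).set a v = (List.range n).map (fun k => if k = a then v else f k) := by
  apply List.ext_getElem
  · simp
  · intro i h1 h2
    simp only [List.length_set, List.length_map, List.length_range] at h1
    simp [List.getElem_set]
    by_cases h : a = i
    · simp [h]
    · simp [h, Ne.symm h]

-- scattering "Y" over a list of in-range positions
lemma scatter_eq (n : Nat) (M : List Nat) (hM : ∀ i ∈ M, i < n) (f : Nat → String) :
    M.foldl (fun r i => r.set i "Y") ((List.range n).map f) =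
      (List.range n).map (fun k => if k ∈ M then "Y" else f k) := by
  induction M generalizing f with
  | nil => simp
  | cons a M ih =>
    rw [List.foldl_cons, set_map_range n a (hM a List.mem_cons_self),
      ih (fun i hi => hM i (List.mem_cons_of_mem _ hi))]
    apply List.map_congr_left
    intro k _
    by_cases h1 : k ∈ M <;> by_cases h2 : k = a <;> simp [h1, h2, List.mem_cons]

-- boolean form of the filter predicate, flipped
lemma and_flip (x y c : Char) : ((x == c) && decide (¬ x = y)) = (!(x == y) && (x == c)) := by
  by_cases h1 : x = y <;> by_cases h2 : x = c <;> by_cases h3 : c = y <;> simp_all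

-- the inverted index holds exactly the non-green positions of each guess letter
lemma whereIdx_getD (g w : List Char) (c : Char) :
    (((List.range g.length).foldl (fun d i =>
        if ((List.range g.length).map (fun i =>
              if g.getD i ' ' = w.getD i ' ' then "G" else "_")).getD i "" = "_"
        then d.modify (g.getD i ' ') [] (· ++ [i]) else d)
      (PySem.Dict.empty : PySem.Dict Char (List Nat))).getD c []) =
    (List.range g.length).filter
      (fun i => !(g.getD i ' ' == w.getD i ' ') && (g.getD i ' ' == c)) := by
  rw [PySem.List.foldl_congr_mem _ _
      (fun d i => if ¬ (g.getD i ' ' = w.getD i ' ') then d.modify (g.getD i ' ') [] (· ++ [i]) else d) _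
      (by
        intro d i hi
        rw [List.mem_range] at hi
        rw [PySem.List.getD_map_range _ _ _ _ hi]
        by_cases h : g.getD i ' ' = w.getD i ' ' <;> simp)]
  rw [PySem.List.foldl_ite_eq_foldl_filter]
  have h1 : List.foldl
      (fun (d : PySem.Dict Char (List Nat)) i => d.modify (g.getD i ' ') [] (· ++ [i]))
      PySem.Dict.empty
      (List.filter (fun x => decide ¬g.getD x ' ' = w.getD x ' ') (List.range g.length))
    = List.foldl (fun (d : PySem.Dict Char (List Nat)) (p : Char × Nat) => d.modify p.1 [] (· ++ [p.2]))
      PySem.Dict.empty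
      ((List.filter (fun x => decide ¬g.getD x ' ' = w.getD x ' ') (List.range g.length)).map
        (fun i => ((g.getD i ' ', i) : Char × Nat))) :=
    (List.foldl_map (f := fun i => ((g.getD i ' ', i) : Char × Nat))
      (g := fun (d : PySem.Dict Char (List Nat)) p => d.modify p.1 [] (· ++ [p.2]))).symm
  rw [h1, PySem.Dict.getD_foldl_modify_append, List.filter_map]
  simp only [PySem.Dict.getD_empty, List.nil_append, List.map_map]
  rw [show ((fun (x : Char × Nat) => x.2) ∘ fun i => ((g.getD i ' ', i) : Char × Nat)) = id from rfl]
  rw [List.map_id, List.filter_filter]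
  apply List.filter_congr
  intro i _
  exact and_flip (g.getD i ' ') (w.getD i ' ') c

-- the scatter pass accumulates exactly the yellow flags of the processed columns
lemma outer_fold (g w : List Char) (D : PySem.Dict Char (List Nat))
    (hD : ∀ c, D.getD c [] = (List.range g.length).filter
      (fun i => !(g.getD i ' ' == w.getD i ' ') && (g.getD i ' ' == c)))
    (L : List Nat) (hL : ∀ j ∈ L, j < g.length) (yp : Nat → Bool) :
    L.foldl (fun res j =>
        if res.getD j "" ≠ "G" then
          (D.getD (w.getD j ' ') []).foldl (fun r i => r.set i "Y") res
        else res) ((List.range g.length).map (patF g w yp)) =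
    (List.range g.length).map (patF g w (fun i => yp i ||
      L.any (fun j => !(g.getD j ' ' == w.getD j ' ') && (w.getD j ' ' == g.getD i ' ')))) := by
  induction L generalizing yp with
  | nil => simp
  | cons a L ih =>
    have ha : a < g.length := hL a List.mem_cons_self
    have hLt : ∀ j ∈ L, j < g.length := fun j hj => hL j (List.mem_cons_of_mem _ hj)
    rw [List.foldl_cons, PySem.List.getD_map_range _ _ _ _ ha]
    by_cases hgr : g.getD a ' ' = w.getD a ' '
    · rw [if_neg (by unfold patF; rw [if_pos hgr]; simp)]
      rw [ih hLt yp]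
      apply List.map_congr_left
      intro i _
      unfold patF
      simp only []
      by_cases hgi : g.getD i ' ' = w.getD i ' '
      · rw [if_pos hgi, if_pos hgi]
      · rw [if_neg hgi, if_neg hgi]
        have h0 : (!(g.getD a ' ' == w.getD a ' ') && (w.getD a ' ' == g.getD i ' ')) = false := by
          rw [beq_iff_eq.mpr hgr]; rfl
        simp only [List.any_cons, h0, Bool.false_or]
    · rw [if_pos (by unfold patF; rw [if_neg hgr]; split <;> decide)]
      rw [hD, scatter_eq _ _ (by
        intro i hi
        rw [List.mem_filter, List.mem_range] at hi
        exact hi.1)]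
      rw [show (List.range g.length).map (fun k =>
            if k ∈ (List.range g.length).filter
                (fun i => !(g.getD i ' ' == w.getD i ' ') && (g.getD i ' ' == w.getD a ' '))
            then "Y" else patF g w yp k) =
          (List.range g.length).map (patF g w
            (fun i => yp i || (w.getD a ' ' == g.getD i ' '))) from by
        apply List.map_congr_left
        intro k hk
        rw [List.mem_range] at hk
        have hmem : k ∈ (List.range g.length).filter
            (fun i => !(g.getD i ' ' == w.getD i ' ') && (g.getD i ' ' == w.getD a ' ')) ↔
            (¬ g.getD k ' ' = w.getD k ' ' ∧ g.getD k ' ' = w.getD a ' ') := by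
          rw [List.mem_filter, List.mem_range]
          simp only [Bool.and_eq_true, Bool.not_eq_true', beq_eq_false_iff_ne, beq_iff_eq, ne_eq]
          exact ⟨fun h => h.2, fun h => ⟨hk, h⟩⟩
        unfold patF
        simp only []
        by_cases hk2 : g.getD k ' ' = w.getD k ' '
        · rw [if_neg (fun h => (hmem.mp h).1 hk2), if_pos hk2, if_pos hk2]
        · rw [if_neg hk2, if_neg hk2]
          by_cases hk3 : g.getD k ' ' = w.getD a ' '
          · rw [if_pos (hmem.mpr ⟨hk2, hk3⟩),
              if_pos (by rw [beq_iff_eq.mpr hk3.symm, Bool.or_true])]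
          · rw [if_neg (fun h => hk3 (hmem.mp h).2)]
            have h0 : (w.getD a ' ' == g.getD k ' ') = false :=
              beq_eq_false_iff_ne.mpr (fun h => hk3 h.symm)
            simp only [h0, Bool.or_false]]
      rw [ih hLt]
      apply List.map_congr_left
      intro i _
      unfold patF
      simp only []
      by_cases hgi : g.getD i ' ' = w.getD i ' '
      · rw [if_pos hgi, if_pos hgi]
      · rw [if_neg hgi, if_neg hgi]
        have h0 : (!(g.getD a ' ' == w.getD a ' ') && (w.getD a ' ' == g.getD i ' '))
            = (w.getD a ' ' == g.getD i ' ') := by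
          rw [beq_eq_false_iff_ne.mpr hgr]; rfl
        simp only [List.any_cons, h0, Bool.or_assoc]

lemma B_eq_pattern (g w : List Char) :
    (let n := g.length
     let res0 := (List.range n).map (fun i => if g.getD i ' ' = w.getD i ' ' then "G" else "_")
     let whereIdx := (List.range n).foldl (fun d i =>
         if res0.getD i "" = "_" then d.modify (g.getD i ' ') [] (· ++ [i]) else d)
       (PySem.Dict.empty : PySem.Dict Char (List Nat))
     (List.range n).foldl (fun res j =>
       if res.getD j "" ≠ "G" then
         (whereIdx.getD (w.getD j ' ') []).foldl (fun r i => r.set i "Y") res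
       else res) res0) =
    (List.range g.length).map (patF g w (ypFull g w)) := by
  simp only []
  have hres0 : (List.range g.length).map (fun i =>
        if g.getD i ' ' = w.getD i ' ' then "G" else "_") =
      (List.range g.length).map (patF g w (fun _ => false)) := by
    apply List.map_congr_left; intro i _; simp [patF]
  rw [hres0]
  rw [outer_fold g w _ (fun c => by rw [← hres0]; exact whereIdx_getD g w c)
    (List.range g.length) (fun j hj => List.mem_range.mp hj) (fun _ => false)]
  apply List.map_congr_left
  intro i _
  simp [patF, ypFull]

lemma get_results_agree (guess word : String)
    (hlen : guess.toList.length ≤ word.toList.length) :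
    get_results_A guess word = get_results_B guess word := by
  unfold get_results_A get_results_B
  rw [A_eq_pattern _ _ hlen, B_eq_pattern]

-- the grouping folds agree step by step
lemma buckets_fold_agree (guess : String) (words : List String)
    (hpre : ∀ w ∈ words, guess ≠ w → guess.toList.length ≤ w.toList.length)
    (d : PySem.Dict (List String) (List String)) :
    words.foldl (fun buckets word =>
      if guess = word then buckets
      else buckets.modify (get_results_A guess word) [] (· ++ [word])) d =
    words.foldl (fun buckets word =>
      if word ≠ guess then buckets.modify (get_results_B guess word) [] (· ++ [word])
      else buckets) d := by
  induction words generalizing d with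
  | nil => rfl
  | cons x xs ih =>
    simp only [List.foldl_cons]
    have hxs : ∀ w ∈ xs, guess ≠ w → guess.toList.length ≤ w.toList.length :=
      fun w hw => hpre w (List.mem_cons_of_mem _ hw)
    by_cases hx : guess = x
    · rw [if_pos hx, if_neg (by simp [hx.symm])]
      exact ih hxs _
    · rw [if_neg hx, if_pos (Ne.symm hx),
        get_results_agree guess x (hpre x List.mem_cons_self hx)]
      exact ih hxs _

-- ===== VERDICT (by name: the statement is the Claim_ definition above) =====
theorem get_buckets_spec : Claim_equal_get_buckets := by
  intro guess poss_words _hdom hpre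
  unfold Spec_get_buckets get_buckets get_buckets_alt
  rw [buckets_fold_agree guess poss_words hpre]
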